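-- pv_equiv track=rewrite | github.com/SzymonJasik21/MOCK3LEKCJA | p1_2.py | f
-- ===== SOURCE A (Python) =====
-- def f(word):
--     if not word:
--         return ""
--
--     wave = []
--     word = word.lower()
--
--     for i in range(len(word)):
--         current_variation = word[:i] + word[i].upper() + word[i+1:]
--         wave.append(current_variation)
--
--     return "-".join(wave)
-- ===== SOURCE B (Python) =====
-- def f(word):
--     out = []
--     pre = ""
--     rest = word.lower()
--     while rest:
--         c, rest = rest[0], rest[1:]
--         out.append(pre + c.upper() + rest)
--         pre += c
--     return "-".join(out)
-- ===== Notes on version B (the rewrite author's own statement) =====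
-- stated objective: alternative
-- what changed: Replaced the index loop with three fresh slices per step by a zipper-style while loop that consumes the string, keeping an incrementally grown prefix and the remaining suffix, so no indices or range() are used.
import Mathlib
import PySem

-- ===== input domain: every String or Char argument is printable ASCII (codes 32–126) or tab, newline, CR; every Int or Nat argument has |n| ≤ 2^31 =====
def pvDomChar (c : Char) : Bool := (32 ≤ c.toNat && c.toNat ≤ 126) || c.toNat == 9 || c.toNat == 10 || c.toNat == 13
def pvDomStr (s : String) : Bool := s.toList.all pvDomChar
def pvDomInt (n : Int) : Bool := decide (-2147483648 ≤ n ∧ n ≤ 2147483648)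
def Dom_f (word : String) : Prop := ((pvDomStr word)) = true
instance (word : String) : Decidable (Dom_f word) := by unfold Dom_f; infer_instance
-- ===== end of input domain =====

-- B replaces the index-and-slices loop by a zipper while-loop (prefix/suffix), same cost; equivalence proved below.

-- ===== PORT A =====
def f (word : String) : String :=
  if word.toList.isEmpty then "" else
    String.ofList (PySem.Chars.join ['-']
      ((PySem.List.pyRange 0 (PySem.List.len (PySem.Chars.lower word.toList)) 1).foldl
        (fun acc i =>
          acc ++ [PySem.List.slice (PySem.Chars.lower word.toList) none (some i)
                  ++ PySem.Chars.upper [PySem.List.pyGetD (PySem.Chars.lower word.toList) i ' ']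
                  ++ PySem.List.slice (PySem.Chars.lower word.toList) (some (i + 1)) none]) []))

-- ===== PORT B =====
def fAltGo (out : List (List Char)) (pre rest : List Char) : List (List Char) :=
  match rest with
  | [] => out
  | c :: rest' => fAltGo (out ++ [pre ++ PySem.Chars.upper [c] ++ rest']) (pre ++ [c]) rest'

def f_alt (word : String) : String :=
  String.ofList (PySem.Chars.join ['-'] (fAltGo [] [] (PySem.Chars.lower word.toList)))

-- ===== PRECONDITION & SPEC =====
def Spec_f (word : String) (out : String) : Prop := out = f_alt word
instance (word : String) (out : String) : Decidable (Spec_f word out) := by unfold Spec_f; infer_instance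

-- ===== CLAIM (what is proved, stated in full; the proofs are below) =====
def Claim_equal_f : Prop := ∀ (word : String), Dom_f word → Spec_f word (f word)

-- ===== LEMMAS AND PROOFS =====

def pvVar (w : List Char) (k : Nat) : List Char :=
  w.take k ++ PySem.Chars.upper [w.getD k ' '] ++ w.drop (k + 1)

theorem fAltGo_eq (rest : List Char) : ∀ (out : List (List Char)) (pre : List Char),
    fAltGo out pre rest
      = out ++ (List.range rest.length).map
          (fun k => pre ++ pvVar rest k) := by
  induction rest with
  | nil => intro out pre; simp [fAltGo]
  | cons c tail ih =>
    intro out pre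
    simp only [fAltGo, ih, List.range_succ_eq_map, List.length_cons]
    rw [List.append_assoc]
    congr 1
    simp only [List.map_cons, List.map_map, List.singleton_append]
    congr 1
    · simp [pvVar, List.getD]
    · apply List.map_congr_left
      intro k hk
      simp [pvVar, Function.comp, List.getD, Nat.succ_eq_add_one, List.append_assoc]

theorem f_eq_map (word : String) :
    f word = if word.toList.isEmpty then "" else
      String.ofList (PySem.Chars.join ['-']
        ((List.range (PySem.Chars.lower word.toList).length).map
          (pvVar (PySem.Chars.lower word.toList)))) := by
  unfold f
  split
  · rfl
  · congr 1
    congr 1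
    rw [PySem.List.foldl_append_singleton_eq_map, List.nil_append]
    simp only [PySem.List.len_eq, PySem.List.pyRange_one, Int.sub_zero, Int.toNat_natCast,
      List.map_map]
    apply List.map_congr_left
    intro k hk
    simp only [List.mem_range] at hk
    have h1 : (0 : Int) + (k : Int) = ((k : Nat) : Int) := by ring
    simp only [Function.comp, h1, pvVar]
    rw [PySem.List.slice_to_natCast]
    have h2 : ((k : Nat) : Int) + 1 = (((k + 1 : Nat)) : Int) := by push_cast; ring
    rw [h2, PySem.List.slice_from_natCast]
    simp [List.getD]

-- ===== VERDICT (by name: the statement is the Claim_ definition above) =====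
theorem f_spec : Claim_equal_f := by
  intro word _
  unfold Spec_f f_alt
  rw [fAltGo_eq, f_eq_map]
  by_cases h : word.toList.isEmpty
  · have : PySem.Chars.lower word.toList = [] := by
      simp [List.isEmpty_iff] at h
      simp [h, PySem.Chars.lower]
    simp [h, this, PySem.Chars.join, List.intercalate]
  · simp [h]
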